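-- pv_equiv track=rewrite | github.com/thiagopelizoni/ProjectEuler | src/problem_320.py | compute_s_for_p
-- ===== SOURCE A (Python) =====
-- def compute_s_for_p(p, M):
--     s = [0] * (M + 1)
--     current = 0
--     for i in range(1, M + 1):
--         current += 1
--         if (i - 1) % p == p - 1:
--             t = 1
--             temp = (i - 1) // p
--             while temp % p == p - 1:
--                 t += 1
--                 temp //= p
--             current -= (p - 1) * t
--         s[i] = current
--     return s
-- ===== SOURCE B (Python) =====
-- def compute_s_for_p(p, M):
--     def digit_sum(n):
--         total = 0
--         while n:
--             total += n % p
--             n //= p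
--         return total
--     return [digit_sum(i) for i in range(M + 1)]
-- ===== Notes on version B (the rewrite author's own statement) =====
-- stated objective: simpler
-- what changed: A builds s incrementally in one pass, correcting each step by a trailing-(p-1)-digit carry count; B computes each entry independently as the base-p digit sum of i with a direct digit-extraction loop.
-- outside the precondition, e.g. on compute_s_for_p(-2, 3): A returns [0, 1, 2, 3], B returns [0, -2, -1, -3]; on compute_s_for_p(0, 2): A raises ZeroDivisionError, B raises ZeroDivisionError
import Mathlib
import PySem

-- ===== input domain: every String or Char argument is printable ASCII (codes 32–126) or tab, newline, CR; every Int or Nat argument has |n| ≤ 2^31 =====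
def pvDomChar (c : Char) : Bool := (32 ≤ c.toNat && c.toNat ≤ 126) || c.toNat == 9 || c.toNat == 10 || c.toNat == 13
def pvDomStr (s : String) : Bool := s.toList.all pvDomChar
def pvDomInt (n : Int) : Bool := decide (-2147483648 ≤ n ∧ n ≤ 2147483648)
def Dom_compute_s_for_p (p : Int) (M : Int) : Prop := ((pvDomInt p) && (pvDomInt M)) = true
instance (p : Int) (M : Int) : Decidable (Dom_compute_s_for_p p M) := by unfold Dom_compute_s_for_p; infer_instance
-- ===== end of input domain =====

-- B computes each entry as an independent base-p digit sum instead of A's incremental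
-- carry-corrected single pass (objective: simpler; same asymptotic cost).

-- ===== PORT A =====
-- A's inner 'while temp % p == p - 1' loop; the fuel temp.toNat + 1 only makes the Lean
-- function total: it is enough for every input where the Python loop terminates (p ≥ 2).
def pvCarryLoop (p : Int) : Nat → Int → Int → Int
  | 0, t, _ => t
  | fuel+1, t, temp =>
    if PySem.Int.mod temp p = p - 1 then
      pvCarryLoop p fuel (t + 1) (PySem.Int.floordiv temp p)
    else t

-- one iteration of A's 'for i in range(1, M+1)' loop; state = (s, current)
def pvAStep (p : Int) (st : List Int × Int) (i : Int) : List Int × Int :=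
  let current := st.2 + 1
  let current :=
    if PySem.Int.mod (i - 1) p = p - 1 then
      let temp := PySem.Int.floordiv (i - 1) p
      current - (p - 1) * pvCarryLoop p (temp.toNat + 1) 1 temp
    else current
  (PySem.List.pySetD st.1 i current, current)

def compute_s_for_p (p : Int) (M : Int) : List Int :=
  ((PySem.List.pyRange 1 (M + 1) 1).foldl (pvAStep p)
    (List.replicate (M + 1).toNat 0, 0)).1

-- ===== PORT B =====
-- B's 'while n: total += n % p; n //= p'; fuel n.toNat + 1 only makes it total
-- (enough whenever the Python loop terminates, in particular for p ≥ 2, n ≥ 0).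
def pvDigitLoop (p : Int) : Nat → Int → Int → Int
  | 0, _, total => total
  | fuel+1, n, total =>
    if n = 0 then total
    else pvDigitLoop p fuel (PySem.Int.floordiv n p) (total + PySem.Int.mod n p)

def pvDigitSum (p : Int) (n : Int) : Int := pvDigitLoop p (n.toNat + 1) n 0

def compute_s_for_p_alt (p : Int) (M : Int) : List Int :=
  (PySem.List.pyRange 0 (M + 1) 1).map (pvDigitSum p)

-- ===== PRECONDITION & SPEC =====
-- Pre_ excludes p ≤ 1 with M ≥ 1: there A raises ZeroDivisionError (p = 0) or never returns
-- (p = 1), and for negative p "base-p digit sums" are unspecified — A's floor-mod carry test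
-- never fires while B extracts negative digits, and neither value is the specified one.
def Pre_compute_s_for_p (p : Int) (M : Int) : Prop := 2 ≤ p ∨ M ≤ 0
instance (p : Int) (M : Int) : Decidable (Pre_compute_s_for_p p M) := by
  unfold Pre_compute_s_for_p; infer_instance

def pvWitness_compute_s_for_p : Int × Int := (2, 5)

def Spec_compute_s_for_p (p : Int) (M : Int) (out : List Int) : Prop := out = compute_s_for_p_alt p M
instance (p : Int) (M : Int) (out : List Int) : Decidable (Spec_compute_s_for_p p M out) := by unfold Spec_compute_s_for_p; infer_instance

-- ===== CLAIM (what is proved, stated in full; the proofs are below) =====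
def Claim_equal_compute_s_for_p : Prop := ∀ (p : Int) (M : Int), Dom_compute_s_for_p p M → Pre_compute_s_for_p p M → Spec_compute_s_for_p p M (compute_s_for_p p M)

-- ===== LEMMAS AND PROOFS =====

-- number of trailing (q-1) digits of m in base q (proof-side spec of A's while loop)
def pvTrail (q : Nat) (m : Nat) : Nat :=
  if h : 2 ≤ q ∧ m % q = q - 1 then pvTrail q (m / q) + 1 else 0
termination_by m
decreasing_by
  obtain ⟨h1, h2⟩ := h
  have hle := Nat.mod_le m q
  exact Nat.div_lt_self (by omega) (by omega)

-- base-q digit sum, the common spec of both programs' entries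
def pvS (q : Nat) (m : Nat) : Nat := (Nat.digits q m).sum

lemma pvDigitLoop_spec (q : Nat) (hq : 2 ≤ q) :
    ∀ (fuel n : Nat) (total : Int), n ≤ fuel →
      pvDigitLoop (q : Int) fuel (n : Int) total = total + (pvS q n : Int) := by
  intro fuel
  induction fuel with
  | zero =>
    intro n total h
    have : n = 0 := by omega
    subst this
    simp [pvDigitLoop, pvS]
  | succ fuel ih =>
    intro n total h
    by_cases hn : n = 0
    · subst hn; simp [pvDigitLoop, pvS]
    · have hrec : pvS q n = n % q + pvS q (n / q) := by
        unfold pvS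
        rw [Nat.digits_def' (by omega : 1 < q) (by omega : 0 < n)]
        simp [List.sum_cons]
      simp only [pvDigitLoop]
      rw [if_neg (by exact_mod_cast hn), PySem.Int.floordiv_natCast, PySem.Int.mod_natCast,
        ih (n / q) _ (by have := Nat.div_lt_self (by omega : 0 < n) (by omega : 1 < q); omega)]
      rw [hrec]
      push_cast
      ring

lemma pvDigitSum_spec (q : Nat) (hq : 2 ≤ q) (n : Nat) :
    pvDigitSum (q : Int) (n : Int) = (pvS q n : Int) := by
  unfold pvDigitSum
  have h := pvDigitLoop_spec q hq (((n : Int)).toNat + 1) n 0 (by simp)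
  simpa using h

lemma pvCarryLoop_spec (q : Nat) (hq : 2 ≤ q) :
    ∀ (fuel m : Nat) (t : Int), m < fuel →
      pvCarryLoop (q : Int) fuel t (m : Int) = t + (pvTrail q m : Int) := by
  intro fuel
  induction fuel with
  | zero => intro m t h; omega
  | succ fuel ih =>
    intro m t h
    simp only [pvCarryLoop, PySem.Int.mod_natCast, PySem.Int.floordiv_natCast]
    by_cases hm : m % q = q - 1
    · rw [if_pos (by push_cast [Nat.cast_sub (by omega : 1 ≤ q)] at *; omega)]
      have h0 : 0 < m := by have := Nat.mod_le m q; omega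
      rw [ih (m / q) (t + 1) (by have := Nat.div_lt_self h0 (by omega : 1 < q); omega)]
      have hT : pvTrail q m = pvTrail q (m / q) + 1 := by
        conv_lhs => rw [pvTrail]
        rw [dif_pos ⟨hq, hm⟩]
      rw [hT]
      push_cast
      ring
    · rw [if_neg (by
        intro hc
        apply hm
        have : ((m % q : Nat) : Int) = ((q - 1 : Nat) : Int) := by
          rw [hc, Nat.cast_sub (by omega : 1 ≤ q)]; simp
        exact_mod_cast this)]
      rw [pvTrail, dif_neg (by tauto)]
      simp

-- the carry identity: digit sum of m+1, in Nat form (no subtraction)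
lemma pvS_succ (q : Nat) (hq : 2 ≤ q) (m : Nat) :
    pvS q (m + 1) + (q - 1) * pvTrail q m = pvS q m + 1 := by
  induction m using Nat.strong_induction_on with
  | _ m ih =>
    have hdm := Nat.div_add_mod m q
    by_cases hm : m % q = q - 1
    · have h0 : 0 < m := by have := Nat.mod_le m q; omega
      have key : m + 1 = q * (m / q + 1) := by rw [Nat.mul_add, Nat.mul_one]; omega
      have hdiv : (m + 1) / q = m / q + 1 := by
        rw [key, Nat.mul_div_cancel_left _ (by omega : 0 < q)]
      have hmod : (m + 1) % q = 0 := by rw [key]; exact Nat.mul_mod_right _ _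
      have hS1 : pvS q (m + 1) = pvS q (m / q + 1) := by
        unfold pvS
        rw [Nat.digits_def' (by omega : 1 < q) (by omega : 0 < m + 1), hdiv, hmod]
        simp
      have hSm : pvS q m = (q - 1) + pvS q (m / q) := by
        unfold pvS
        rw [Nat.digits_def' (by omega : 1 < q) h0, hm]
        simp
      have hT : pvTrail q m = pvTrail q (m / q) + 1 := by
        conv_lhs => rw [pvTrail]
        rw [dif_pos ⟨hq, hm⟩]
      have ihq := ih (m / q) (Nat.div_lt_self h0 (by omega : 1 < q))
      rw [hS1, hT, hSm, Nat.mul_add, Nat.mul_one]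
      generalize hX : (q - 1) * pvTrail q (m / q) = X at ihq ⊢
      omega
    · have hT : pvTrail q m = 0 := by rw [pvTrail, dif_neg (by tauto)]
      have hlt : m % q < q - 1 := by have := Nat.mod_lt m (by omega : 0 < q); omega
      rcases Nat.eq_zero_or_pos m with h0 | h0
      · subst h0
        have h1 : pvS q 1 = 1 := by
          unfold pvS
          rw [Nat.digits_def' (by omega : 1 < q) (by omega : (0:Nat) < 1)]
          simp [Nat.mod_eq_of_lt (by omega : 1 < q), Nat.div_eq_of_lt (by omega : 1 < q)]
        have h00 : pvS q 0 = 0 := by simp [pvS]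
        rw [hT]
        simp [h1, h00]
      · have hdiv : (m + 1) / q = m / q := by
          apply Nat.div_eq_of_lt_le
          · calc m / q * q = q * (m / q) := Nat.mul_comm _ _
              _ ≤ m + 1 := by omega
          · calc m + 1 < q * (m / q) + q := by omega
              _ = (m / q).succ * q := by rw [Nat.succ_mul, Nat.mul_comm]
        have hmod : (m + 1) % q = m % q + 1 := by
          have h2 := Nat.div_add_mod (m + 1) q
          rw [hdiv] at h2
          omega
        have hS1 : pvS q (m + 1) = m % q + 1 + pvS q (m / q) := by
          unfold pvS
          rw [Nat.digits_def' (by omega : 1 < q) (by omega : 0 < m + 1), hdiv, hmod]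
          simp
        have hSm : pvS q m = m % q + pvS q (m / q) := by
          unfold pvS
          rw [Nat.digits_def' (by omega : 1 < q) h0]
          simp
        rw [hS1, hSm, hT]
        omega

-- the list update s[k+1] = digit sum of k+1, on the invariant's list shape
lemma pvSetStep (q N k : Nat) (hk : k + 1 ≤ N) :
    PySem.List.pySetD ((List.range (k + 1)).map (fun j => (pvS q j : Int)) ++ List.replicate (N - k) 0)
        ((k : Int) + 1) ((pvS q (k + 1) : Int))
      = (List.range (k + 2)).map (fun j => (pvS q j : Int)) ++ List.replicate (N - (k + 1)) 0 := by
  have h1 : ((k : Int) + 1) = ((k + 1 : Nat) : Int) := by push_cast; ring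
  rw [h1, PySem.List.pySetD_natCast, List.set_append]
  have hlen : (((List.range (k + 1)).map (fun j => (pvS q j : Int)))).length = k + 1 := by simp
  rw [if_neg (by omega), hlen, Nat.sub_self]
  rw [show N - k = (N - (k + 1)) + 1 by omega, List.replicate_succ, List.set_cons_zero]
  simp [List.range_succ]

-- loop invariant for A's fold, M = N : Nat
lemma pvA_invariant (q N : Nat) (hq : 2 ≤ q) :
    ∀ k : Nat, k ≤ N →
      (PySem.List.pyRange 1 ((k : Int) + 1) 1).foldl (pvAStep (q : Int))
          (List.replicate (N + 1) 0, 0)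
        = ((List.range (k + 1)).map (fun j => (pvS q j : Int)) ++ List.replicate (N - k) 0,
           (pvS q k : Int)) := by
  intro k
  induction k with
  | zero =>
    intro _
    rw [show ((0:Nat):Int) + 1 = 1 by norm_num, PySem.List.pyRange_one_eq_nil (by norm_num)]
    simp [pvS, List.range_one, List.replicate_succ]
  | succ k ih =>
    intro hk
    have hk' : k ≤ N := by omega
    have hq0 : 0 < q := by omega
    have hcast : ((k + 1 : Nat) : Int) + 1 = ((k : Int) + 1) + 1 := by push_cast; ring
    rw [hcast, PySem.List.pyRange_one_succ_right (by omega), List.foldl_append, ih hk']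
    simp only [List.foldl_cons, List.foldl_nil, pvAStep, add_sub_cancel_right,
      PySem.Int.mod_natCast, PySem.Int.floordiv_natCast, Int.toNat_natCast]
    have hq1 : ((q - 1 : Nat) : Int) = (q : Int) - 1 := by
      rw [Nat.cast_sub (by omega : 1 ≤ q)]; simp
    by_cases hm : k % q = q - 1
    · rw [if_pos (by rw [hm, hq1])]
      rw [pvCarryLoop_spec q hq (k / q + 1) (k / q) 1 (by omega)]
      have hT : pvTrail q k = pvTrail q (k / q) + 1 := by
        conv_lhs => rw [pvTrail]
        rw [dif_pos ⟨hq, hm⟩]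
      have hstep := pvS_succ q hq k
      have hcur : (pvS q k : Int) + 1 - ((q : Int) - 1) * (1 + (pvTrail q (k / q) : Int))
          = (pvS q (k + 1) : Int) := by
        rw [hT] at hstep
        have : ((pvS q (k+1) + (q - 1) * (pvTrail q (k/q) + 1) : Nat) : Int)
            = ((pvS q k + 1 : Nat) : Int) := by exact_mod_cast hstep
        push_cast [Nat.cast_sub (by omega : 1 ≤ q)] at this
        linarith
      rw [hcur]
      refine Prod.ext ?_ rfl
      exact pvSetStep q N k (by omega)
    · rw [if_neg (by rw [hq1.symm]; intro hc; exact hm (by exact_mod_cast hc))]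
      have hT : pvTrail q k = 0 := by rw [pvTrail, dif_neg (by tauto)]
      have hstep := pvS_succ q hq k
      rw [hT] at hstep
      have hcur : (pvS q k : Int) + 1 = (pvS q (k + 1) : Int) := by
        exact_mod_cast (congrArg (fun n : Nat => (n : Int)) hstep).symm
      rw [hcur]
      refine Prod.ext ?_ rfl
      exact pvSetStep q N k (by omega)

-- ===== VERDICT (by name: the statement is the Claim_ definition above) =====
theorem compute_s_for_p_spec : Claim_equal_compute_s_for_p := by
  intro p M _ hpre
  unfold Spec_compute_s_for_p compute_s_for_p compute_s_for_p_alt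
  by_cases hM0 : M + 1 ≤ 0
  · rw [PySem.List.pyRange_one_eq_nil (by omega), PySem.List.pyRange_zero,
      show (M + 1).toNat = 0 by omega]
    simp
  · by_cases hM1 : M ≤ 0
    · have hM : M = 0 := by omega
      subst hM
      rw [PySem.List.pyRange_one_eq_nil (by norm_num), PySem.List.pyRange_zero]
      norm_num
      simp [pvDigitSum, pvDigitLoop]
    · have hp : 2 ≤ p := by
        rcases hpre with h | h
        · exact h
        · omega
      obtain ⟨q, rfl⟩ : ∃ q : Nat, p = (q : Int) := ⟨p.toNat, by omega⟩
      obtain ⟨N, rfl⟩ : ∃ N : Nat, M = (N : Int) := ⟨M.toNat, by omega⟩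
      have hq : 2 ≤ q := by exact_mod_cast hp
      rw [show ((N : Int) + 1).toNat = N + 1 by omega, pvA_invariant q N hq N le_rfl]
      simp only [Nat.sub_self, List.replicate_zero, List.append_nil]
      rw [show ((N : Int) + 1) = ((N + 1 : Nat) : Int) by push_cast; ring,
        PySem.List.pyRange_zero_nat, List.map_map]
      refine List.map_congr_left ?_
      intro j _
      exact (pvDigitSum_spec q hq j).symm
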